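-- pv_equiv track=rewrite | github.com/csssu/codedone3 | Week8/ProblemA.py | is_zumkeller
-- ===== SOURCE A (Python) =====
-- def is_zumkeller(n):
--     divisors = [i for i in range(1, n + 1) if n % i == 0]
--
--     if sum(divisors) % 2 != 0:
--         return "Not Zumkeller!"
--
--     target_sum = sum(divisors) // 2
--     current_sum = 0
--     chosen_divisors = []
--
--     for divisor in sorted(divisors, reverse=True):
--         if current_sum + divisor <= target_sum:
--             current_sum += divisor
--             chosen_divisors.append(divisor)
--
--     if current_sum == target_sum:
--         return "Zumkeller!"
--     else:
--         return "Not Zumkeller!"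
-- ===== SOURCE B (Python) =====
-- def is_zumkeller(n):
--     # Enumerate divisors in pairs up to sqrt(n) instead of scanning 1..n.
--     divs = set()
--     i = 1
--     while i * i <= n:
--         if n % i == 0:
--             divs.add(i)
--             divs.add(n // i)
--         i += 1
--     s = sum(divs)
--     if s % 2 != 0:
--         return "Not Zumkeller!"
--     rem = s // 2
--     for d in sorted(divs, reverse=True):
--         if d <= rem:
--             rem -= d
--     return "Zumkeller!" if rem == 0 else "Not Zumkeller!"
-- ===== Notes on version B (the rewrite author's own statement) =====
-- stated objective: faster
-- what changed: B enumerates divisors in pairs (i, n//i) with a while-loop up to sqrt(n) building a set, instead of scanning the whole range 1..n, and runs the greedy fill by tracking the remaining amount instead of the accumulated sum and a chosen list.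
import Mathlib
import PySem

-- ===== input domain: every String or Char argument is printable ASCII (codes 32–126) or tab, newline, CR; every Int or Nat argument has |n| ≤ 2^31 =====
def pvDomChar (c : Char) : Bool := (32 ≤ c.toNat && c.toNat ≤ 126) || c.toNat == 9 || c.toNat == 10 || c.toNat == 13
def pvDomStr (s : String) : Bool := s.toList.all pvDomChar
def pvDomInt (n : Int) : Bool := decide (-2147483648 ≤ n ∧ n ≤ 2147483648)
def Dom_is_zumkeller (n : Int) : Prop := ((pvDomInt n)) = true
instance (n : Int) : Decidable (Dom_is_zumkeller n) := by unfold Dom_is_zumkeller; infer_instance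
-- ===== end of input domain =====

-- B enumerates divisors in pairs up to √n (instead of scanning 1..n) and runs the
-- greedy fill tracking the remaining amount; objective: faster.

-- ===== PORT A =====
def is_zumkeller (n : Int) : String :=
  let divisors := (PySem.List.pyRange 1 (n + 1) 1).filter (fun i => PySem.Int.mod n i == 0)
  if PySem.Int.mod divisors.sum 2 != 0 then "Not Zumkeller!"
  else
    let target_sum := PySem.Int.floordiv divisors.sum 2
    let p := (PySem.List.sorted divisors (fun x => x) true).foldl
      (fun (p : Int × List Int) divisor =>
        if p.1 + divisor ≤ target_sum then (p.1 + divisor, p.2 ++ [divisor]) else p)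
      (0, ([] : List Int))
    if p.1 == target_sum then "Zumkeller!" else "Not Zumkeller!"

-- ===== PORT B =====
-- the `while i * i <= n` loop of Source B
def zumDivsLoop (n : Int) (i : Int) (divs : PySem.Set Int) : PySem.Set Int :=
  if i * i ≤ n then
    zumDivsLoop n (i + 1)
      (if PySem.Int.mod n i == 0 then
        PySem.Set.add (PySem.Set.add divs i) (PySem.Int.floordiv n i)
      else divs)
  else divs
termination_by (n + 1 - i).toNat
decreasing_by
  have hi : i ≤ n := by nlinarith [sq_nonneg i]
  omega

def is_zumkeller_alt (n : Int) : String :=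
  let divs := zumDivsLoop n 1 PySem.Set.empty
  let s := divs.sum
  if PySem.Int.mod s 2 != 0 then "Not Zumkeller!"
  else
    let rem := (PySem.List.sorted divs (fun x => x) true).foldl
      (fun rem d => if d ≤ rem then rem - d else rem)
      (PySem.Int.floordiv s 2)
    if rem == 0 then "Zumkeller!" else "Not Zumkeller!"

-- ===== PRECONDITION & SPEC =====
def Spec_is_zumkeller (n : Int) (out : String) : Prop := out = is_zumkeller_alt n
instance (n : Int) (out : String) : Decidable (Spec_is_zumkeller n out) := by unfold Spec_is_zumkeller; infer_instance

-- ===== CLAIM (what is proved, stated in full; the proofs are below) =====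
def Claim_equal_is_zumkeller : Prop := ∀ (n : Int), Dom_is_zumkeller n → Spec_is_zumkeller n (is_zumkeller n)

-- ===== LEMMAS AND PROOFS =====

-- membership in the sqrt-loop's set (the loop is only ever entered with 1 ≤ i)
theorem mem_zumDivsLoop (n i : Int) (divs : PySem.Set Int) (x : Int) :
    1 ≤ i →
    (x ∈ zumDivsLoop n i divs ↔
      x ∈ divs ∨ ∃ j : Int, i ≤ j ∧ j * j ≤ n ∧ PySem.Int.mod n j = 0 ∧
        (x = j ∨ x = PySem.Int.floordiv n j)) := by
  induction i, divs using zumDivsLoop.induct (n := n) with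
  | case1 i divs h ih =>
    intro hi
    simp only [dite_eq_ite] at ih
    rw [zumDivsLoop, if_pos h, ih (by omega)]
    by_cases hmod : (PySem.Int.mod n i == 0) = true
    · rw [if_pos hmod]
      simp only [PySem.Set.mem_add]
      constructor
      · rintro (((hd | rfl) | rfl) | ⟨j, hj1, hj2, hj3, hj4⟩)
        · exact Or.inl hd
        · exact Or.inr ⟨x, le_refl x, h, by simpa using hmod, Or.inl rfl⟩
        · exact Or.inr ⟨i, le_refl i, h, by simpa using hmod, Or.inr rfl⟩
        · exact Or.inr ⟨j, by omega, hj2, hj3, hj4⟩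
      · rintro (hd | ⟨j, hj1, hj2, hj3, hj4⟩)
        · exact Or.inl (Or.inl (Or.inl hd))
        · rcases eq_or_lt_of_le hj1 with rfl | hlt
          · rcases hj4 with rfl | rfl
            · exact Or.inl (Or.inl (Or.inr rfl))
            · exact Or.inl (Or.inr rfl)
          · exact Or.inr ⟨j, by omega, hj2, hj3, hj4⟩
    · rw [if_neg hmod]
      constructor
      · rintro (hd | ⟨j, hj1, hj2, hj3, hj4⟩)
        · exact Or.inl hd
        · exact Or.inr ⟨j, by omega, hj2, hj3, hj4⟩
      · rintro (hd | ⟨j, hj1, hj2, hj3, hj4⟩)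
        · exact Or.inl hd
        · rcases eq_or_lt_of_le hj1 with rfl | hlt
          · exact absurd (by simpa using hj3) hmod
          · exact Or.inr ⟨j, by omega, hj2, hj3, hj4⟩
  | case2 i divs h =>
    intro hi
    rw [zumDivsLoop, if_neg h]
    constructor
    · exact Or.inl
    · rintro (hd | ⟨j, hj1, hj2, hj3, hj4⟩)
      · exact hd
      · exact absurd hj2 (by nlinarith)

theorem nodup_zumDivsLoop (n i : Int) (divs : PySem.Set Int)
    (h : divs.Nodup) : (zumDivsLoop n i divs).Nodup := by
  induction i, divs using zumDivsLoop.induct (n := n) with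
  | case1 i divs hc ih =>
    rw [zumDivsLoop, if_pos hc]
    apply ih
    simp only [dite_eq_ite]
    by_cases hmod : (PySem.Int.mod n i == 0) = true
    · rw [if_pos hmod]
      exact PySem.Set.nodup_add _ _ (PySem.Set.nodup_add _ _ h)
    · rwa [if_neg hmod]
  | case2 i divs hc =>
    rwa [zumDivsLoop, if_neg hc]

-- the mathematical core: the paired enumeration finds exactly the divisors in [1, n]
theorem pair_enum_char (n x : Int) :
    (∃ j : Int, 1 ≤ j ∧ j * j ≤ n ∧ PySem.Int.mod n j = 0 ∧
        (x = j ∨ x = PySem.Int.floordiv n j)) ↔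
      (1 ≤ x ∧ x < n + 1 ∧ PySem.Int.mod n x = 0) := by
  constructor
  · rintro ⟨j, hj1, hjsq, hjmod, hx⟩
    have hjdvd : j ∣ n := (PySem.Int.mod_eq_zero_iff_dvd n j).mp hjmod
    obtain ⟨k, hk⟩ := hjdvd
    have hk1 : 1 ≤ k := by nlinarith
    have hfd : PySem.Int.floordiv n j = k := by
      rw [PySem.Int.floordiv_eq_ediv_of_pos (by omega), hk,
        Int.mul_ediv_cancel_left _ (by omega)]
    rcases hx with rfl | rfl
    · exact ⟨hj1, by nlinarith, hjmod⟩
    · rw [hfd]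
      refine ⟨hk1, by nlinarith, ?_⟩
      rw [PySem.Int.mod_eq_zero_iff_dvd]
      exact ⟨j, by rw [hk]; ring⟩
  · rintro ⟨hx1, hxn, hxmod⟩
    have hxdvd : x ∣ n := (PySem.Int.mod_eq_zero_iff_dvd n x).mp hxmod
    obtain ⟨k, hk⟩ := hxdvd
    have hn1 : 1 ≤ n := by omega
    have hk1 : 1 ≤ k := by nlinarith
    by_cases hsq : x * x ≤ n
    · exact ⟨x, hx1, hsq, hxmod, Or.inl rfl⟩
    · refine ⟨k, hk1, by nlinarith, ?_, Or.inr ?_⟩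
      · rw [PySem.Int.mod_eq_zero_iff_dvd]
        exact ⟨x, by rw [hk]; ring⟩
      · rw [PySem.Int.floordiv_eq_ediv_of_pos (by omega), hk, mul_comm,
          Int.mul_ediv_cancel_left _ (by omega)]

-- A's divisor list and B's divisor set are permutations of each other
theorem divisors_perm (n : Int) :
    ((PySem.List.pyRange 1 (n + 1) 1).filter (fun i => PySem.Int.mod n i == 0)).Perm
      (zumDivsLoop n 1 PySem.Set.empty) := by
  refine (List.perm_ext_iff_of_nodup
    ((PySem.List.nodup_pyRange_one 1 (n + 1)).filter _)
    (nodup_zumDivsLoop n 1 _ List.nodup_nil)).mpr ?_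
  intro a
  rw [List.mem_filter, PySem.List.mem_pyRange_one,
    mem_zumDivsLoop n 1 _ a le_rfl]
  simp only [beq_iff_eq, List.not_mem_nil, false_or]
  rw [pair_enum_char]
  constructor
  · rintro ⟨⟨h1, h2⟩, h3⟩; exact ⟨h1, h2, h3⟩
  · rintro ⟨h1, h2, h3⟩; exact ⟨⟨h1, h2⟩, h3⟩

-- descending sorts of the two divisor collections agree
theorem sorted_eq (n : Int) :
    PySem.List.sorted ((PySem.List.pyRange 1 (n + 1) 1).filter (fun i => PySem.Int.mod n i == 0)) (fun x => x) true
      = PySem.List.sorted (zumDivsLoop n 1 PySem.Set.empty) (fun x => x) true := by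
  set dA := (PySem.List.pyRange 1 (n + 1) 1).filter (fun i => PySem.Int.mod n i == 0) with hdA
  have hpw : dA.reverse.Pairwise (fun a b : Int => b < a) := by
    rw [List.pairwise_reverse]
    exact (PySem.List.pairwise_lt_pyRange_one 1 (n + 1)).sublist List.filter_sublist
  rw [PySem.List.sorted_rev_eq_of_perm_of_pairwise_gt dA dA.reverse _ dA.reverse_perm hpw,
    PySem.List.sorted_rev_eq_of_perm_of_pairwise_gt _ dA.reverse _
      (dA.reverse_perm.trans (divisors_perm n)) hpw]

-- A's accumulated sum and B's remaining amount are two views of the same greedy fill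
theorem greedy_fold (l : List Int) (target cur rem : Int) (acc : List Int)
    (h : rem = target - cur) :
    (l.foldl (fun (p : Int × List Int) d =>
        if p.1 + d ≤ target then (p.1 + d, p.2 ++ [d]) else p) (cur, acc)).1
      = target - l.foldl (fun r d => if d ≤ r then r - d else r) rem := by
  induction l generalizing cur rem acc with
  | nil => simp only [List.foldl_nil]; omega
  | cons d t ih =>
    simp only [List.foldl_cons]
    by_cases hc : cur + d ≤ target
    · rw [if_pos hc, if_pos (by omega : d ≤ rem)]
      exact ih (cur + d) (rem - d) _ (by omega)
    · rw [if_neg hc, if_neg (by omega : ¬ d ≤ rem)]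
      exact ih cur rem acc h

-- ===== VERDICT (by name: the statement is the Claim_ definition above) =====
theorem is_zumkeller_spec : Claim_equal_is_zumkeller := by
  intro n _
  unfold Spec_is_zumkeller
  simp only [is_zumkeller, is_zumkeller_alt]
  rw [(divisors_perm n).sum_eq, sorted_eq n]
  set s := (zumDivsLoop n 1 PySem.Set.empty).sum with hs
  set l := PySem.List.sorted (zumDivsLoop n 1 PySem.Set.empty) (fun x => x) true with hl
  by_cases hpar : (PySem.Int.mod s 2 != 0) = true
  · rw [if_pos hpar, if_pos hpar]
  · rw [if_neg hpar, if_neg hpar]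
    have hfold := greedy_fold l (PySem.Int.floordiv s 2) 0 (PySem.Int.floordiv s 2)
      [] (by ring)
    rw [hfold]
    rcases eq_or_ne (l.foldl (fun r d => if d ≤ r then r - d else r)
        (PySem.Int.floordiv s 2)) 0 with hr | hr
    · rw [hr]; norm_num
    · have h1 : (PySem.Int.floordiv s 2 -
          l.foldl (fun r d => if d ≤ r then r - d else r) (PySem.Int.floordiv s 2)
            == PySem.Int.floordiv s 2) = false := by
        simp only [beq_eq_false_iff_ne, ne_eq]; omega
      have h2 : (l.foldl (fun r d => if d ≤ r then r - d else r)
          (PySem.Int.floordiv s 2) == 0) = false := by simp only [beq_eq_false_iff_ne, ne_eq]; exact hr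
      rw [h1, h2]
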